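-- pv_equiv track=rewrite | github.com/sun10081/leetcode_practice_xiaorui | questions/2501_2600/2531_2540/2530_maximal_score.py | maxKelements
-- ===== SOURCE A (Python) =====
-- import heapq
-- from typing import List
--
-- def maxKelements(nums: List[int], k: int) -> int:
--     ans = 0
--     nums = [-num for num in nums]
--     heapq.heapify(nums)
--
--     while k:
--         ans -= heapq.heapreplace(nums, nums[0] // 3)
--         k -= 1
--     return ans
-- ===== SOURCE B (Python) =====
-- from typing import List
--
-- def maxKelements(nums: List[int], k: int) -> int:
--     # No heap: work on a copy, k linear scans for the current maximum.
--     nums = list(nums)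
--     ans = 0
--     for _ in range(k):
--         bi = 0
--         for i in range(1, len(nums)):
--             if nums[i] > nums[bi]:
--                 bi = i
--         best = nums[bi]
--         ans += best
--         nums[bi] = -((-best) // 3)
--     return ans
-- ===== Notes on version B (the rewrite author's own statement) =====
-- stated objective: simpler
-- what changed: B drops the binary heap (heapify + k heapreplace sifts on a negated array) and instead works on a plain copy of nums, doing k linear scans for the current maximum and overwriting it in place with -((-best)//3).
import Mathlib
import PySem

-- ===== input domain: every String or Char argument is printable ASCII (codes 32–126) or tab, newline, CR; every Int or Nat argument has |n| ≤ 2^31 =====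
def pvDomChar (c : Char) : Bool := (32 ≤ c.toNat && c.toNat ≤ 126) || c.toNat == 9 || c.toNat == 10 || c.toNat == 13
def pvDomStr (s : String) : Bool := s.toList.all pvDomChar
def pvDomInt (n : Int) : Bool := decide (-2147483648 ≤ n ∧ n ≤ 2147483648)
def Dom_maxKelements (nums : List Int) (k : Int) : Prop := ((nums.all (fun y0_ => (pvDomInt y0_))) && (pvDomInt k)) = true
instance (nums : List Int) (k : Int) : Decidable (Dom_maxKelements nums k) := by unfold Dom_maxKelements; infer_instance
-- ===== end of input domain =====

-- B replaces the heap with a copied list and k linear max-scans: simpler, no heapq machinery (objective: simpler).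

-- ===== PORT A =====
-- A calls heapq.heapify/heapreplace; PySem has no heap, so the CPython reference
-- implementation of heapq (_siftup/_siftdown/heapify/heapreplace) is ported by hand,
-- step for step; it is exact on integers (indices kept as Nat, reads via getD are
-- always in range on admitted inputs).

-- CPython _siftup's first loop ("while childpos < endpos"); returns the array and the final pos.
def siftupLoop (endpos : Nat) (heap : List Int) (pos : Nat) : List Int × Nat :=
  if h : 2 * pos + 1 < endpos then
    let childpos := 2 * pos + 1
    let rightpos := childpos + 1
    let cp := if rightpos < endpos ∧ ¬ (heap.getD childpos 0 < heap.getD rightpos 0) then rightpos else childpos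
    siftupLoop endpos (heap.set pos (heap.getD cp 0)) cp
  else (heap, pos)
  termination_by endpos - pos
  decreasing_by split <;> omega

-- CPython _siftdown's loop ("while pos > startpos"), with the trailing "heap[pos] = newitem".
def siftdownLoop (newitem : Int) (heap : List Int) (startpos pos : Nat) : List Int :=
  if h : startpos < pos then
    let parentpos := (pos - 1) / 2
    let parent := heap.getD parentpos 0
    if newitem < parent then siftdownLoop newitem (heap.set pos parent) startpos parentpos
    else heap.set pos newitem
  else heap.set pos newitem
  termination_by pos
  decreasing_by omega

-- CPython _siftup(heap, pos): save newitem, bubble the smaller child up to a leaf,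
-- place newitem there, then _siftdown back toward pos.
def siftup (heap : List Int) (pos : Nat) : List Int :=
  let newitem := heap.getD pos 0
  let r := siftupLoop heap.length heap pos
  siftdownLoop newitem (r.1.set r.2 newitem) pos r.2

-- heapify: for i in reversed(range(n // 2)): _siftup(x, i)
def heapifyAux (heap : List Int) : Nat → List Int
  | 0 => heap
  | i + 1 => heapifyAux (siftup heap i) i

def heapify (heap : List Int) : List Int := heapifyAux heap (heap.length / 2)

-- the while-k loop: ans -= heapreplace(nums, nums[0] // 3); heapreplace returns heap[0],
-- writes the new item at the root and siftups from 0.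
def aLoop : Nat → Int → List Int → Int
  | 0, ans, _ => ans
  | f + 1, ans, heap =>
      let item := PySem.Int.floordiv (heap.getD 0 0) 3
      let ret := heap.getD 0 0
      aLoop f (ans - ret) (siftup (heap.set 0 item) 0)

def maxKelements (nums : List Int) (k : Int) : Int :=
  aLoop k.toNat 0 (heapify (nums.map (fun num => -num)))

-- ===== PORT B =====
-- inner loop "for i in range(1, len(nums)): if nums[i] > nums[bi]: bi = i"
def scanIdx (m : List Int) (i bi : Nat) : Nat :=
  if h : i < m.length then
    scanIdx m (i + 1) (if m.getD i 0 > m.getD bi 0 then i else bi)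
  else bi
  termination_by m.length - i

-- outer loop "for _ in range(k)"
def bLoop : Nat → Int → List Int → Int
  | 0, ans, _ => ans
  | f + 1, ans, m =>
      let bi := scanIdx m 1 0
      let best := m.getD bi 0
      bLoop f (ans + best) (m.set bi (-(PySem.Int.floordiv (-best) 3)))

def maxKelements_alt (nums : List Int) (k : Int) : Int :=
  bLoop k.toNat 0 nums

-- ===== PRECONDITION & SPEC =====
-- Pre_ excludes exactly the inputs on which the Python A does not return:
-- k < 0 (A's `while k` never terminates) and nums = [] with k > 0 (heapreplace raises IndexError).
def Pre_maxKelements (nums : List Int) (k : Int) : Prop := 0 ≤ k ∧ (k = 0 ∨ nums ≠ [])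
instance (nums : List Int) (k : Int) : Decidable (Pre_maxKelements nums k) := by
  unfold Pre_maxKelements; infer_instance

def pvWitness_maxKelements : List Int × Int := ([2, 10, 3, 5, 10, 7], 4)

def Spec_maxKelements (nums : List Int) (k : Int) (out : Int) : Prop := out = maxKelements_alt nums k
instance (nums : List Int) (k : Int) (out : Int) : Decidable (Spec_maxKelements nums k out) := by
  unfold Spec_maxKelements; infer_instance

-- ===== CLAIM (what is proved, stated in full; the proofs are below) =====
def Claim_equal_maxKelements : Prop := ∀ (nums : List Int) (k : Int), Dom_maxKelements nums k → Pre_maxKelements nums k → Spec_maxKelements nums k (maxKelements nums k)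

-- ===== LEMMAS AND PROOFS =====

-- --- basic getD/set toolkit ---
lemma getDset_self {l : List Int} {i : Nat} (h : i < l.length) (v : Int) :
    (l.set i v).getD i 0 = v := by
  simp [List.getD, h]

lemma getDset_ne {l : List Int} {i j : Nat} (h : i ≠ j) (v : Int) :
    (l.set i v).getD j 0 = l.getD j 0 := by
  simp [List.getD, List.getElem?_set_ne h]

lemma set_getD_self {l : List Int} {i : Nat} (h : i < l.length) : l.set i (l.getD i 0) = l := by
  simp [List.getD, List.getElem?_eq_getElem h, List.set_getElem_self]

lemma getD_mem {l : List Int} {i : Nat} (h : i < l.length) : l.getD i 0 ∈ l := by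
  simp [List.getD, List.getElem?_eq_getElem h]

lemma mem_getD {l : List Int} {x : Int} (h : x ∈ l) : ∃ i, i < l.length ∧ l.getD i 0 = x := by
  obtain ⟨i, hi, he⟩ := List.getElem_of_mem h
  exact ⟨i, hi, by simp [List.getD, List.getElem?_eq_getElem hi, he]⟩

lemma getD_eq {l : List Int} {i : Nat} (h : i < l.length) : l.getD i 0 = l[i] := by
  simp [List.getD, List.getElem?_eq_getElem h]

lemma count_set {l : List Int} {i : Nat} (hi : i < l.length) (v y : Int) :
    (l.set i v).count y + (if l.getD i 0 = y then 1 else 0)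
      = l.count y + (if v = y then 1 else 0) := by
  have hd : l = l.take i ++ l[i] :: l.drop (i+1) := by
    rw [← List.drop_eq_getElem_cons hi, List.take_append_drop]
  have hc : l.count y = (l.take i).count y + (l.drop (i+1)).count y
      + (if l[i] = y then 1 else 0) := by
    conv_lhs => rw [hd]
    rw [List.count_append, List.count_cons]
    by_cases h2 : l[i] = y <;> simp [h2] <;> omega
  rw [List.set_eq_take_cons_drop v hi, getD_eq hi, hc, List.count_append, List.count_cons]
  by_cases h1 : v = y <;> by_cases h2 : l[i] = y <;> simp [h1, h2] <;> omega

lemma set_perm_set {l1 l2 : List Int} (p : l1.Perm l2) {i j : Nat} (v : Int)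
    (hi : i < l1.length) (hj : j < l2.length) (he : l1.getD i 0 = l2.getD j 0) :
    (l1.set i v).Perm (l2.set j v) := by
  rw [List.perm_iff_count]
  intro y
  have c1 := count_set hi v y
  have c2 := count_set hj v y
  have hp := (List.perm_iff_count.1 p) y
  rw [he] at c1
  omega

def swapV (l : List Int) (i j : Nat) : List Int := (l.set i (l.getD j 0)).set j (l.getD i 0)

lemma swapV_length (l : List Int) (i j : Nat) : (swapV l i j).length = l.length := by
  simp [swapV]

lemma swapV_perm {l : List Int} {i j : Nat} (hi : i < l.length) (hj : j < l.length) :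
    (swapV l i j).Perm l := by
  rw [List.perm_iff_count]
  intro y
  have c1 := count_set hi (l.getD j 0) y
  have c2 := count_set (show j < (l.set i (l.getD j 0)).length by simpa using hj) (l.getD i 0) y
  have hb : (l.set i (l.getD j 0)).getD j 0 = l.getD j 0 := by
    by_cases hij : i = j
    · subst hij; exact getDset_self hi _
    · exact getDset_ne hij _
  rw [hb] at c2
  have : (swapV l i j).count y = ((l.set i (l.getD j 0)).set j (l.getD i 0)).count y := rfl
  rw [this]
  omega

lemma getD_swapV_fst {l : List Int} {i j : Nat} (hi : i < l.length) (hij : i ≠ j) :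
    (swapV l i j).getD i 0 = l.getD j 0 := by
  rw [swapV, getDset_ne (Ne.symm hij), getDset_self hi]

lemma getD_swapV_snd {l : List Int} {i j : Nat} (hj : j < l.length) :
    (swapV l i j).getD j 0 = l.getD i 0 := by
  rw [swapV, getDset_self (by simpa using hj)]

lemma getD_swapV_other {l : List Int} {i j t : Nat} (h1 : i ≠ t) (h2 : j ≠ t) :
    (swapV l i j).getD t 0 = l.getD t 0 := by
  rw [swapV, getDset_ne h2, getDset_ne h1]

-- --- parent/ancestor ---
def par (p : Nat) : Nat := (p - 1) / 2

def isAnc (a p : Nat) : Prop := ∃ t, par^[t] p = a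

lemma isAnc_refl (p : Nat) : isAnc p p := ⟨0, rfl⟩

lemma iterate_par_le (t p : Nat) : par^[t] p ≤ p := by
  induction t generalizing p with
  | zero => simp
  | succ t ih =>
      rw [Function.iterate_succ_apply]
      exact le_trans (ih (par p)) (by unfold par; omega)

lemma isAnc_le {a p : Nat} (h : isAnc a p) : a ≤ p := by
  obtain ⟨t, ht⟩ := h
  rw [← ht]
  exact iterate_par_le t p

lemma isAnc_par {a p : Nat} (h : isAnc a p) (hne : a ≠ p) : isAnc a (par p) := by
  obtain ⟨t, ht⟩ := h
  cases t with
  | zero => exact absurd ht.symm hne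
  | succ t => exact ⟨t, by rw [← Function.iterate_succ_apply par t p]; exact ht⟩

lemma isAnc_child {a p c : Nat} (h : isAnc a p) (hc : par c = p) : isAnc a c := by
  obtain ⟨t, ht⟩ := h
  exact ⟨t + 1, by rw [Function.iterate_succ_apply, hc, ht]⟩

lemma child_par {j c : Nat} (hc : c = 2 * j + 1 ∨ c = 2 * j + 2) : par c = j := by
  unfold par; omega

lemma par_child (p : Nat) (hp : 0 < p) : p = 2 * par p + 1 ∨ p = 2 * par p + 2 := by
  unfold par; omega

-- --- heap predicates ---
def edgeOK (l : List Int) (j c : Nat) : Prop := c < l.length → l.getD j 0 ≤ l.getD c 0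

def HeapFrom (l : List Int) (s : Nat) : Prop :=
  ∀ j c, s ≤ j → (c = 2 * j + 1 ∨ c = 2 * j + 2) → edgeOK l j c

lemma heapFrom_root_min {l : List Int} (h : HeapFrom l 0) :
    ∀ j, j < l.length → l.getD 0 0 ≤ l.getD j 0 := by
  intro j
  induction j using Nat.strong_induction_on with
  | _ j ih =>
      intro hj
      rcases Nat.eq_zero_or_pos j with h0 | h0
      · simp [h0]
      · have hpar : par j < j := by unfold par; omega
        exact le_trans (ih (par j) hpar (lt_trans hpar hj))
          (h (par j) j (Nat.zero_le _) (par_child j h0) hj)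

-- --- swap-formulated sift phases (proof models of the port's loops) ---
def supV (l : List Int) (endpos pos : Nat) : List Int × Nat :=
  if h : 2 * pos + 1 < endpos then
    let c := if 2 * pos + 2 < endpos ∧ ¬ (l.getD (2 * pos + 1) 0 < l.getD (2 * pos + 2) 0)
             then 2 * pos + 2 else 2 * pos + 1
    supV (swapV l pos c) endpos c
  else (l, pos)
  termination_by endpos - pos
  decreasing_by split <;> omega

def sdownV (l : List Int) (startpos pos : Nat) : List Int :=
  if startpos < pos ∧ l.getD pos 0 < l.getD (par pos) 0 then
    sdownV (swapV l pos (par pos)) startpos (par pos)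
  else l
  termination_by pos
  decreasing_by unfold par; omega

lemma siftupLoop_eq_supV :
    ∀ (fuel ep : Nat) (l : List Int) (pos : Nat) (newitem : Int),
      ep ≤ l.length → ep - pos ≤ fuel → pos < l.length →
      (siftupLoop ep l pos).1.set (siftupLoop ep l pos).2 newitem
        = (supV (l.set pos newitem) ep pos).1
      ∧ (siftupLoop ep l pos).2 = (supV (l.set pos newitem) ep pos).2 := by
  intro fuel
  induction fuel with
  | zero =>
      intro ep l pos newitem hep hf hp
      rw [siftupLoop, supV]
      have h1 : ¬ (2 * pos + 1 < ep) := by omega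
      rw [dif_neg h1, dif_neg h1]
      exact ⟨rfl, rfl⟩
  | succ fuel ih =>
      intro ep l pos newitem hep hf hp
      rw [siftupLoop, supV]
      by_cases h1 : 2 * pos + 1 < ep
      · rw [dif_pos h1, dif_pos h1]
        dsimp only
        have e1 : (l.set pos newitem).getD (2 * pos + 1) 0 = l.getD (2 * pos + 1) 0 :=
          getDset_ne (by omega) _
        have e2 : (l.set pos newitem).getD (2 * pos + 2) 0 = l.getD (2 * pos + 2) 0 :=
          getDset_ne (by omega) _
        rw [show (2:Nat) * pos + 1 + 1 = 2 * pos + 2 by omega, e1, e2]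
        set cp := if 2 * pos + 2 < ep ∧ ¬ l.getD (2 * pos + 1) 0 < l.getD (2 * pos + 2) 0
          then 2 * pos + 2 else 2 * pos + 1 with hcp
        have hcp1 : 2 * pos + 1 ≤ cp := by rw [hcp]; split <;> omega
        have hcp2 : cp < ep := by rw [hcp]; split <;> omega
        have hswap : swapV (l.set pos newitem) pos cp = (l.set pos (l.getD cp 0)).set cp newitem := by
          have g1 : (l.set pos newitem).getD cp 0 = l.getD cp 0 := getDset_ne (by omega) _
          have g2 : (l.set pos newitem).getD pos 0 = newitem := getDset_self hp _
          rw [swapV, g1, g2, List.set_set]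
        rw [hswap]
        exact ih ep (l.set pos (l.getD cp 0)) cp newitem (by simpa using hep)
          (by omega) (by simp; omega)
      · rw [dif_neg h1, dif_neg h1]
        exact ⟨rfl, rfl⟩

lemma siftdownLoop_eq_sdownV :
    ∀ (pos : Nat) (l : List Int) (newitem : Int) (startpos : Nat), pos < l.length →
      siftdownLoop newitem l startpos pos = sdownV (l.set pos newitem) startpos pos := by
  intro pos
  induction pos using Nat.strong_induction_on with
  | _ pos ih =>
    intro l newitem startpos hp
    rw [siftdownLoop, sdownV]
    have g2 : (l.set pos newitem).getD pos 0 = newitem := getDset_self hp _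
    by_cases hs : startpos < pos
    · have hparlt : par pos < pos := by unfold par; omega
      have hpareq : (pos - 1) / 2 = par pos := rfl
      have g1 : (l.set pos newitem).getD (par pos) 0 = l.getD (par pos) 0 :=
        getDset_ne (by omega) _
      rw [dif_pos hs]
      dsimp only
      rw [hpareq]
      by_cases hlt : newitem < l.getD (par pos) 0
      · rw [if_pos hlt, if_pos (show startpos < pos ∧ (l.set pos newitem).getD pos 0
            < (l.set pos newitem).getD (par pos) 0 by rw [g1, g2]; exact ⟨hs, hlt⟩)]
        have hswap : swapV (l.set pos newitem) pos (par pos)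
            = (l.set pos (l.getD (par pos) 0)).set (par pos) newitem := by
          rw [swapV, g1, g2, List.set_set]
        rw [hswap, ih (par pos) hparlt _ newitem startpos (by simp; omega)]
      · rw [if_neg hlt, if_neg]
        intro hcond
        rw [g1, g2] at hcond
        exact hlt hcond.2
    · rw [dif_neg hs, if_neg (fun hc => hs hc.1)]

-- --- phase specs ---
lemma sdownV_spec :
    ∀ (pos : Nat) (l : List Int) (start : Nat),
      pos < l.length → start ≤ pos → isAnc start pos →
      (∀ j c, start ≤ j → (c = 2 * j + 1 ∨ c = 2 * j + 2) →
        (start < pos ∧ j = par pos ∧ c = pos) ∨ edgeOK l j c) →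
      (start < pos → ∀ c, (c = 2 * pos + 1 ∨ c = 2 * pos + 2) → c < l.length →
        l.getD (par pos) 0 ≤ l.getD c 0) →
      (sdownV l start pos).Perm l ∧ HeapFrom (sdownV l start pos) start := by
  intro pos
  induction pos using Nat.strong_induction_on with
  | _ pos ih =>
    intro l start hp hs hanc hH hC
    rw [sdownV]
    by_cases hcond : start < pos ∧ l.getD pos 0 < l.getD (par pos) 0
    · rw [if_pos hcond]
      obtain ⟨hsp, hlt⟩ := hcond
      have hppos : 0 < pos := by omega
      have hparlt : par pos < pos := by unfold par; omega
      have hparlen : par pos < l.length := lt_trans hparlt hp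
      have hanc' : isAnc start (par pos) := isAnc_par hanc (by omega)
      have hs' : start ≤ par pos := isAnc_le hanc'
      have g_pos : (swapV l pos (par pos)).getD pos 0 = l.getD (par pos) 0 :=
        getD_swapV_fst hp (by omega)
      have g_par : (swapV l pos (par pos)).getD (par pos) 0 = l.getD pos 0 :=
        getD_swapV_snd hparlen
      have g_other : ∀ t, t ≠ pos → t ≠ par pos → (swapV l pos (par pos)).getD t 0 = l.getD t 0 :=
        fun t h1 h2 => getD_swapV_other (Ne.symm h1) (Ne.symm h2)
      have hlen' : (swapV l pos (par pos)).length = l.length := swapV_length l pos (par pos)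
      have hH' : ∀ j c, start ≤ j → (c = 2 * j + 1 ∨ c = 2 * j + 2) →
          (start < par pos ∧ j = par (par pos) ∧ c = par pos)
          ∨ edgeOK (swapV l pos (par pos)) j c := by
        intro j c hj hcrel
        have hcpos : pos < c → c ≠ pos := by omega
        by_cases hc_pos : c = pos
        · -- then j = par pos
          have hjpar : j = par pos := by rw [← child_par hcrel, hc_pos]
          right
          intro hclen
          rw [hjpar, hc_pos, g_par, g_pos]
          exact le_of_lt hlt
        · by_cases hc_par : c = par pos
          · -- j = par (par pos); this is the new exempt edge
            have hjpp : j = par (par pos) := by rw [← child_par hcrel, hc_par]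
            have hsppar : start < par pos := by
              rcases hcrel with h | h <;> rw [hjpp] at hj <;> rw [h] at hc_par <;> omega
            exact Or.inl ⟨hsppar, hjpp, hc_par⟩
          · right
            intro hclen
            rw [hlen'] at hclen
            have gc : (swapV l pos (par pos)).getD c 0 = l.getD c 0 := g_other c hc_pos hc_par
            by_cases hj_pos : j = pos
            · -- children of pos
              rw [hj_pos, g_pos, gc]
              exact hC hsp c (by rw [← hj_pos]; exact hcrel) hclen
            · by_cases hj_par : j = par pos
              · -- sibling of pos under par pos
                rw [hj_par, g_par, gc]
                have he := hH (par pos) c (by omega) (by rw [← hj_par]; exact hcrel)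
                rcases he with ⟨_, _, hcc⟩ | he
                · exact absurd hcc hc_pos
                · exact le_of_lt (lt_of_lt_of_le hlt (he hclen))
              · rw [g_other j hj_pos hj_par, gc]
                have he := hH j c hj hcrel
                rcases he with ⟨_, hjj, hcc⟩ | he
                · exact absurd hcc hc_pos
                · exact he hclen
      have hC' : start < par pos → ∀ c, (c = 2 * (par pos) + 1 ∨ c = 2 * (par pos) + 2) →
          c < (swapV l pos (par pos)).length →
          (swapV l pos (par pos)).getD (par (par pos)) 0 ≤ (swapV l pos (par pos)).getD c 0 := by
        intro hspp c hcrel hclen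
        rw [hlen'] at hclen
        have hpp_lt : par (par pos) < par pos := by
          have h9 := hspp
          unfold par at h9 ⊢
          omega
        have gpp : (swapV l pos (par pos)).getD (par (par pos)) 0 = l.getD (par (par pos)) 0 :=
          g_other _ (by omega) (by omega)
        have hspp_le : start ≤ par (par pos) := isAnc_le (isAnc_par hanc' (by omega))
        have hedge_pp : l.getD (par (par pos)) 0 ≤ l.getD (par pos) 0 := by
          have he := hH (par (par pos)) (par pos) hspp_le (par_child (par pos) (by omega))
          rcases he with ⟨_, _, hcc⟩ | he
          · omega
          · exact he hparlen
        rw [gpp]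
        by_cases hc_pos : c = pos
        · rw [hc_pos, g_pos]
          exact hedge_pp
        · have gc : (swapV l pos (par pos)).getD c 0 = l.getD c 0 :=
            g_other c hc_pos (by omega)
          rw [gc]
          have he := hH (par pos) c (by omega) hcrel
          rcases he with ⟨_, _, hcc⟩ | he
          · exact absurd hcc hc_pos
          · exact le_trans hedge_pp (he hclen)
      have hrec := ih (par pos) hparlt (swapV l pos (par pos)) start
        (by rw [hlen']; exact hparlen) hs' hanc' hH' hC'
      exact ⟨hrec.1.trans (swapV_perm hp hparlen), hrec.2⟩
    · rw [if_neg hcond]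
      refine ⟨List.Perm.refl l, ?_⟩
      intro j c hj hcrel hclen
      rcases hH j c hj hcrel with ⟨hsp, hj', hc'⟩ | he
      · rw [hj', hc']
        push Not at hcond
        exact hcond hsp
      · exact he hclen

lemma supV_spec :
    ∀ (fuel : Nat) (l : List Int) (pos start : Nat), l.length - pos ≤ fuel →
      pos < l.length → start ≤ pos → isAnc start pos →
      (∀ j c, start ≤ j → (c = 2 * j + 1 ∨ c = 2 * j + 2) →
        j = pos ∨ (start < pos ∧ j = par pos ∧ c = pos) ∨ edgeOK l j c) →
      (start < pos → ∀ c, (c = 2 * pos + 1 ∨ c = 2 * pos + 2) → c < l.length →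
        l.getD (par pos) 0 ≤ l.getD c 0) →
      (supV l l.length pos).1.Perm l ∧
      (supV l l.length pos).2 < l.length ∧ l.length ≤ 2 * (supV l l.length pos).2 + 1 ∧
      start ≤ (supV l l.length pos).2 ∧ isAnc start (supV l l.length pos).2 ∧
      (∀ j c, start ≤ j → (c = 2 * j + 1 ∨ c = 2 * j + 2) →
        (start < (supV l l.length pos).2 ∧ j = par (supV l l.length pos).2
          ∧ c = (supV l l.length pos).2)
        ∨ edgeOK (supV l l.length pos).1 j c) := by
  intro fuel
  induction fuel with
  | zero =>
      intro l pos start hf hp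
      omega
  | succ fuel ih =>
      intro l pos start hf hp hs hanc hH hC
      rw [supV]
      by_cases h1 : 2 * pos + 1 < l.length
      · rw [dif_pos h1]
        dsimp only
        set c := if 2 * pos + 2 < l.length ∧ ¬ (l.getD (2 * pos + 1) 0 < l.getD (2 * pos + 2) 0)
          then 2 * pos + 2 else 2 * pos + 1 with hc
        have hc1 : 2 * pos + 1 ≤ c := by rw [hc]; split <;> omega
        have hc2 : c ≤ 2 * pos + 2 := by rw [hc]; split <;> omega
        have hclen : c < l.length := by rw [hc]; split <;> omega
        have hcpar : par c = pos := child_par (by omega)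
        have hcase : (c = 2 * pos + 1 ∧ (2 * pos + 2 < l.length →
              l.getD (2 * pos + 1) 0 < l.getD (2 * pos + 2) 0))
            ∨ (c = 2 * pos + 2 ∧ 2 * pos + 2 < l.length ∧
              l.getD (2 * pos + 2) 0 ≤ l.getD (2 * pos + 1) 0) := by
          rw [hc]
          split
          · rename_i hg
            exact Or.inr ⟨rfl, hg.1, Int.not_lt.mp hg.2⟩
          · rename_i hg
            push Not at hg
            exact Or.inl ⟨rfl, hg⟩
        have hmin : ∀ s, (s = 2 * pos + 1 ∨ s = 2 * pos + 2) → s < l.length →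
            l.getD c 0 ≤ l.getD s 0 := by
          intro s hsrel hslen
          rcases hcase with ⟨he, himp⟩ | ⟨he, hlt2, hle⟩ <;> rcases hsrel with h | h <;>
            subst h <;> rw [he]
          · exact le_of_lt (himp hslen)
          · exact hle
        -- facts about the swapped array
        have g_pos : (swapV l pos c).getD pos 0 = l.getD c 0 := getD_swapV_fst hp (by omega)
        have g_c : (swapV l pos c).getD c 0 = l.getD pos 0 := getD_swapV_snd hclen
        have g_other : ∀ t, t ≠ pos → t ≠ c → (swapV l pos c).getD t 0 = l.getD t 0 :=
          fun t ha hb => getD_swapV_other (Ne.symm ha) (Ne.symm hb)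
        have hlen' : (swapV l pos c).length = l.length := swapV_length l pos c
        have hH' : ∀ j cc, start ≤ j → (cc = 2 * j + 1 ∨ cc = 2 * j + 2) →
            j = c ∨ (start < c ∧ j = par c ∧ cc = c) ∨ edgeOK (swapV l pos c) j cc := by
          intro j cc hj hcrel
          by_cases hj_c : j = c
          · exact Or.inl hj_c
          · by_cases hcc_c : cc = c
            · have hjpos : j = pos := by rw [← child_par hcrel, hcc_c, hcpar]
              exact Or.inr (Or.inl ⟨by omega, by rw [hjpos, hcpar], hcc_c⟩)
            · right; right
              intro hcclen
              rw [hlen'] at hcclen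
              by_cases hcc_pos : cc = pos
              · -- the old exempt edge (par pos → pos): it now holds
                have hjp : j = par pos := by rw [← child_par hcrel, hcc_pos]
                have hsp : start < pos := by
                  rcases hcrel with h | h <;> rw [hcc_pos] at h <;> omega
                rw [hjp, hcc_pos, g_pos]
                have gj : (swapV l pos c).getD (par pos) 0 = l.getD (par pos) 0 := by
                  refine g_other _ ?_ (by unfold par; omega)
                  unfold par; omega
                rw [gj]
                exact hC hsp c (by omega) hclen
              · have gcc := g_other cc hcc_pos hcc_c
                by_cases hj_pos : j = pos
                · rw [hj_pos, g_pos, gcc]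
                  exact hmin cc (by rw [← hj_pos]; exact hcrel) hcclen
                · rw [g_other j hj_pos hj_c, gcc]
                  rcases hH j cc hj hcrel with h | h | h
                  · exact absurd h hj_pos
                  · exact absurd h.2.2 hcc_pos
                  · exact h hcclen
        have hC' : start < c → ∀ cc, (cc = 2 * c + 1 ∨ cc = 2 * c + 2) →
            cc < (swapV l pos c).length →
            (swapV l pos c).getD (par c) 0 ≤ (swapV l pos c).getD cc 0 := by
          intro _ cc hcrel hcclen
          rw [hlen'] at hcclen
          rw [hcpar, g_pos]
          have gcc : (swapV l pos c).getD cc 0 = l.getD cc 0 :=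
            g_other cc (by omega) (by omega)
          rw [gcc]
          rcases hH c cc (by omega) hcrel with h | h | h
          · exact absurd h (by omega)
          · exact absurd h.2.2 (by omega)
          · exact h hcclen
        have hrec := ih (swapV l pos c) c start (by rw [hlen']; omega)
          (by rw [hlen']; exact hclen) (by omega) (isAnc_child hanc hcpar) hH' hC'
        rw [hlen'] at hrec
        refine ⟨hrec.1.trans (swapV_perm hp hclen), hrec.2.1, hrec.2.2.1, hrec.2.2.2.1,
          hrec.2.2.2.2.1, hrec.2.2.2.2.2⟩
      · rw [dif_neg h1]
        refine ⟨List.Perm.refl l, hp, by omega, hs, hanc, ?_⟩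
        intro j cc hj hcrel
        rcases hH j cc hj hcrel with h | h | h
        · right
          intro hcclen
          have hll : ((l, pos).1 : List Int).length = l.length := rfl
          rw [h] at hcrel
          omega
        · exact Or.inl h
        · exact Or.inr h

lemma siftup_spec {l : List Int} {pos : Nat} (hp : pos < l.length)
    (hh : HeapFrom l (pos + 1)) :
    (siftup l pos).Perm l ∧ HeapFrom (siftup l pos) pos := by
  have heq := siftupLoop_eq_supV l.length l.length l pos (l.getD pos 0) (le_refl _)
    (by omega) hp
  rw [set_getD_self hp] at heq
  obtain ⟨heq1, heq2⟩ := heq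
  have hsup := supV_spec l.length l pos pos (by omega) hp (le_refl _) (isAnc_refl pos)
    (by
      intro j c hj hcrel
      by_cases hjp : j = pos
      · exact Or.inl hjp
      · exact Or.inr (Or.inr (hh j c (by omega) hcrel)))
    (fun hcon => absurd hcon (lt_irrefl pos))
  obtain ⟨hperm, hS2lt, hS2leaf, hS2ge, hS2anc, hHout⟩ := hsup
  have hS1len : (supV l l.length pos).1.length = l.length := hperm.length_eq
  have hsd := sdownV_spec (supV l l.length pos).2 (supV l l.length pos).1 pos
    (by omega) hS2ge hS2anc hHout
    (by
      intro _ c hcrel hclen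
      rw [hS1len] at hclen
      omega)
  have hview : siftup l pos = sdownV (supV l l.length pos).1 pos (supV l l.length pos).2 := by
    unfold siftup
    dsimp only
    rw [heq1, heq2, siftdownLoop_eq_sdownV _ _ _ _ (by omega)]
    rw [← heq1, ← heq2, List.set_set, heq1, heq2]
  rw [hview]
  exact ⟨hsd.1.trans hperm, hsd.2⟩

lemma heapifyAux_spec :
    ∀ (m : Nat) (l : List Int), 2 * m ≤ l.length → HeapFrom l m →
      (heapifyAux l m).Perm l ∧ HeapFrom (heapifyAux l m) 0 := by
  intro m
  induction m with
  | zero => exact fun l _ hh => ⟨List.Perm.refl l, hh⟩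
  | succ m ih =>
      intro l hm hh
      have hmlt : m < l.length := by omega
      have hsp := siftup_spec hmlt hh
      have hrec := ih (siftup l m) (by rw [hsp.1.length_eq]; omega) hsp.2
      exact ⟨hrec.1.trans hsp.1, hrec.2⟩

lemma heapify_spec (l : List Int) : (heapify l).Perm l ∧ HeapFrom (heapify l) 0 := by
  unfold heapify
  apply heapifyAux_spec
  · omega
  · intro j c hj hcrel hclen
    omega

-- --- B's scan ---
lemma scanIdx_spec :
    ∀ (fuel : Nat) (m : List Int) (i bi : Nat), m.length - i ≤ fuel →
      bi < m.length → (∀ j, j < i → m.getD j 0 ≤ m.getD bi 0) →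
      scanIdx m i bi < m.length ∧ ∀ j, j < m.length → m.getD j 0 ≤ m.getD (scanIdx m i bi) 0 := by
  intro fuel
  induction fuel with
  | zero =>
      intro m i bi hf hbi hinv
      rw [scanIdx, dif_neg (by omega)]
      exact ⟨hbi, fun j hj => hinv j (by omega)⟩
  | succ fuel ih =>
      intro m i bi hf hbi hinv
      rw [scanIdx]
      by_cases hi : i < m.length
      · rw [dif_pos hi]
        split
        · rename_i hgt
          apply ih m (i + 1) i (by omega) hi
          intro j hj
          rcases Nat.lt_or_ge j i with h | h
          · exact le_trans (hinv j h) (le_of_lt hgt)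
          · have : j = i := by omega
            rw [this]
        · rename_i hgt
          apply ih m (i + 1) bi (by omega) hbi
          intro j hj
          rcases Nat.lt_or_ge j i with h | h
          · exact hinv j h
          · have : j = i := by omega
            rw [this]
            exact Int.not_lt.mp hgt
      · rw [dif_neg hi]
        exact ⟨hbi, fun j hj => hinv j (by omega)⟩

-- --- the coupled loops ---
lemma getD_map_neg {m : List Int} {i : Nat} (h : i < m.length) :
    (m.map (fun num => -num)).getD i 0 = -(m.getD i 0) := by
  simp [List.getD, List.getElem?_eq_getElem h]

lemma loops_agree :
    ∀ (fuel : Nat) (ans : Int) (h m : List Int),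
      HeapFrom h 0 → h.Perm (m.map (fun num => -num)) → m ≠ [] →
      aLoop fuel ans h = bLoop fuel ans m := by
  intro fuel
  induction fuel with
  | zero => intro ans h m _ _ _; rfl
  | succ fuel ih =>
      intro ans h m hH hperm hne
      have hm0 : 0 < m.length := List.length_pos_of_ne_nil hne
      have hmaplen : (m.map (fun num => -num)).length = m.length := by simp
      have hh0 : 0 < h.length := by rw [hperm.length_eq, hmaplen]; exact hm0
      have hscan := scanIdx_spec m.length m 1 0 (by omega) hm0
        (by
          intro j hj
          have : j = 0 := by omega
          rw [this])
      set bi := scanIdx m 1 0 with hbi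
      have hroot : h.getD 0 0 = -(m.getD bi 0) := by
        apply le_antisymm
        · have hmem : -(m.getD bi 0) ∈ h :=
            (hperm.mem_iff).mpr (List.mem_map.mpr ⟨m.getD bi 0, getD_mem hscan.1, rfl⟩)
          obtain ⟨j, hjl, hje⟩ := mem_getD hmem
          rw [← hje]
          exact heapFrom_root_min hH j hjl
        · have hmem2 : h.getD 0 0 ∈ m.map (fun num => -num) :=
            (hperm.mem_iff).mp (getD_mem hh0)
          obtain ⟨x, hxm, hxe⟩ := List.mem_map.mp hmem2
          obtain ⟨j, hjl, hje⟩ := mem_getD hxm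
          have hle := hscan.2 j hjl
          rw [hje] at hle
          omega
      have hH1 : HeapFrom (h.set 0 (PySem.Int.floordiv (h.getD 0 0) 3)) 1 := by
        intro j c hj hcrel hclen
        rw [List.length_set] at hclen
        rw [getDset_ne (by omega) _, getDset_ne (by omega) _]
        exact hH j c (Nat.zero_le _) hcrel hclen
      have hsp := siftup_spec (show 0 < (h.set 0 (PySem.Int.floordiv (h.getD 0 0) 3)).length
        by simpa using hh0) hH1
      have hperm' : (siftup (h.set 0 (PySem.Int.floordiv (h.getD 0 0) 3)) 0).Perm
          ((m.set bi (-(PySem.Int.floordiv (-(m.getD bi 0)) 3))).map (fun num => -num)) := by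
        have p1 : (h.set 0 (PySem.Int.floordiv (h.getD 0 0) 3)).Perm
            ((m.map (fun num => -num)).set bi (PySem.Int.floordiv (h.getD 0 0) 3)) := by
          apply set_perm_set hperm _ hh0 (by rw [hmaplen]; exact hscan.1)
          rw [getD_map_neg hscan.1, hroot]
        have p2 : ((m.map (fun num => -num)).set bi (PySem.Int.floordiv (h.getD 0 0) 3))
            = ((m.set bi (-(PySem.Int.floordiv (-(m.getD bi 0)) 3))).map (fun num => -num)) := by
          rw [List.map_set, hroot, neg_neg]
        exact hsp.1.trans (p1.trans (by rw [p2]))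
      have hne' : m.set bi (-(PySem.Int.floordiv (-(m.getD bi 0)) 3)) ≠ [] := by
        intro hcon
        have h2 := congrArg List.length hcon
        simp only [List.length_set, List.length_nil] at h2
        omega
      have hrec := ih (ans - h.getD 0 0) _ _ hsp.2 hperm' hne'
      rw [aLoop, bLoop]
      rw [← hbi, hroot, sub_neg_eq_add]
      rw [hroot, sub_neg_eq_add] at hrec
      exact hrec

-- ===== VERDICT (by name: the statement is the Claim_ definition above) =====
theorem maxKelements_spec : Claim_equal_maxKelements := by
  intro nums k _ hpre
  obtain ⟨hk, hor⟩ := hpre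
  show maxKelements nums k = maxKelements_alt nums k
  rcases hor with hk0 | hne
  · subst hk0
    rfl
  · have hfacts := heapify_spec (nums.map (fun num => -num))
    exact loops_agree k.toNat 0 _ nums hfacts.2 hfacts.1 hne
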